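-- pv_equiv track=rewrite | github.com/Sharkovisky/encurtador-url | app/controllers/validacao.py | variarPossibilidades
-- ===== SOURCE A (Python) =====
-- from itertools import product
--
-- def variarPossibilidades(link, maximo_variacoes=1000):
--
--     """
--     Função para verificar todas as possibilidades possíveis com links que possuam I ou L.
--
--     :param link: Recebimento do link encurtado depois da rota '/'.
--     :type link(String(100)):
--     :return: Retorna um Array com todas as possibilidades de links com a troca das letras "I" e "L".
--     :rtype: String
--     :raises ValueError: Se a String estiver vazia
--
--     Example:
--         >>> variarPossibilidades("https://g1.globo.com/")
--         ["https://g1.globo.com/", "https://g1.giobo.com/", "https://g1.gIobo.com/", "https://g1.gLobo.com/"]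
--
--         .. note::
--             Esta função assume que os valores são Strings.
--     """
--
--     """ Gera variações substituindo I ↔ L, mas limita o número máximo. """
--
--     mapeamento = {'i': 'l', 'l': 'i'}
--     posicoes = [i for i, c in enumerate(link) if c in mapeamento]
--
--     num_possivel = min(len(posicoes), maximo_variacoes)
--
--     variacoes = set()
--     for combinacao in product(*[(c, mapeamento.get(c, c)) for c in link]):
--         variacoes.add("".join(combinacao))
--         if len(variacoes) >= maximo_variacoes:
--             break
--
--     return variacoes
-- ===== SOURCE B (Python) =====
-- def variarPossibilidades(link, maximo_variacoes=1000):
--     """Prefix-doubling over the i/l positions only, truncated to the cap at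
--     every step, instead of scanning the full 2^len(link) cartesian product."""
--     swap = {'i': 'l', 'l': 'i'}
--     limit = 1 if maximo_variacoes < 1 else maximo_variacoes
--     variants = [[]]
--     for c in reversed(link):
--         if c in swap:
--             variants = ([[c] + v for v in variants] +
--                         [[swap[c]] + v for v in variants])[:limit]
--         else:
--             variants = [[c] + v for v in variants]
--     return {"".join(v) for v in variants}
-- ===== Notes on version B (the rewrite author's own statement) =====
-- stated objective: faster
-- what changed: A enumerates the full itertools.product over every character of the link (2^len(link) tuples, deduplicated into a set with an early break); B prefix-doubles only over the actual i/l positions, truncating the variant list to the cap at every step, and never materialises duplicate combinations.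
import Mathlib
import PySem

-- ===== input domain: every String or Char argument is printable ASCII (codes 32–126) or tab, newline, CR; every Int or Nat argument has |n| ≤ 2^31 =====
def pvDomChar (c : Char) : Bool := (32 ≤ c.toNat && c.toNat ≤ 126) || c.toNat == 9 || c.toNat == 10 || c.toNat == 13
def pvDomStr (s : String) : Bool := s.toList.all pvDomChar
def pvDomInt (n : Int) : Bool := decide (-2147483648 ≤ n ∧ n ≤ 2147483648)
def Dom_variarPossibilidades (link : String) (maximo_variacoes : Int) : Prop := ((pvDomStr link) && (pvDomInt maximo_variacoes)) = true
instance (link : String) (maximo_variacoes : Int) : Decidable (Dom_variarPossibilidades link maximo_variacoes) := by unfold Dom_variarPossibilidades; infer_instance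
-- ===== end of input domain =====

-- B enumerates only the reachable i/l-variants by prefix-doubling over the swap
-- positions, truncated to the cap at every step, instead of scanning the full
-- 2^len(link) cartesian product; the returned set is identical.

-- ===== PORT A =====
-- itertools.product(*[(c, mapeamento.get(c, c)) for c in link]): the first
-- iterable varies slowest — exactly this recursion (exact port of itertools.product on pairs)
def pvProdA : List (Char × Char) → List (List Char)
  | [] => [[]]
  | (a, b) :: rest => ((pvProdA rest).map (fun t => a :: t)) ++ ((pvProdA rest).map (fun t => b :: t))

-- the for-loop over the product with its early break; "".join(combinacao) is
-- String.ofList (exact: every tuple component is a single character)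
def pvLoopA (maximo : Int) : List (List Char) → PySem.Set String → PySem.Set String
  | [], s => s
  | comb :: rest, s =>
    let s' := s.add (String.ofList comb)
    if maximo ≤ PySem.Set.len s' then s' else pvLoopA maximo rest s'

def variarPossibilidades (link : String) (maximo_variacoes : Int) : List String :=
  let mapeamento : PySem.Dict Char Char := PySem.Dict.ofList [('i', 'l'), ('l', 'i')]
  let posicoes : List Int := ((PySem.List.enumerate link.toList).filter (fun ic => mapeamento.contains ic.2)).map (fun ic => ic.1)
  let _num_possivel : Int := min (posicoes.length : Int) maximo_variacoes  -- computed and never used, as in A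
  pvLoopA maximo_variacoes (pvProdA (link.toList.map (fun c => (c, mapeamento.getD c c)))) PySem.Set.empty

-- ===== PORT B =====
-- variants[:limit] is List.take limit.toNat (exact: limit ≥ 1 here); swap[c]
-- under the 'c in swap' test is swap.getD c c (exact: the key is present)
def variarPossibilidades_alt (link : String) (maximo_variacoes : Int) : List String :=
  let swap : PySem.Dict Char Char := PySem.Dict.ofList [('i', 'l'), ('l', 'i')]
  let limit : Int := if maximo_variacoes < 1 then 1 else maximo_variacoes
  let variants : List (List Char) :=
    link.toList.reverse.foldl (fun vs c =>
      if swap.contains c then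
        (vs.map (fun v => c :: v) ++ vs.map (fun v => swap.getD c c :: v)).take limit.toNat
      else vs.map (fun v => c :: v)) [[]]
  PySem.Set.ofList (variants.map String.ofList)

-- ===== PRECONDITION & SPEC =====
def Spec_variarPossibilidades (link : String) (maximo_variacoes : Int) (out : List String) : Prop := out = variarPossibilidades_alt link maximo_variacoes
instance (link : String) (maximo_variacoes : Int) (out : List String) : Decidable (Spec_variarPossibilidades link maximo_variacoes out) := by unfold Spec_variarPossibilidades; infer_instance

-- ===== CLAIM (what is proved, stated in full; the proofs are below) =====
def Claim_equal_variarPossibilidades : Prop := ∀ (link : String) (maximo_variacoes : Int), Dom_variarPossibilidades link maximo_variacoes → Spec_variarPossibilidades link maximo_variacoes (variarPossibilidades link maximo_variacoes)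

-- ===== LEMMAS AND PROOFS =====

-- the i/l swap as a plain function, and which characters swap
def pvSwapC (c : Char) : Char := if c = 'i' then 'l' else if c = 'l' then 'i' else c
def pvIsSwap (c : Char) : Bool := c = 'i' || c = 'l'

-- the distinct variants, in A's first-insertion order (= binary counting over swap positions)
def pvSpine : List Char → List (List Char)
  | [] => [[]]
  | c :: rest =>
    if pvIsSwap c = true then (pvSpine rest).map (fun t => c :: t) ++ (pvSpine rest).map (fun t => pvSwapC c :: t)
    else (pvSpine rest).map (fun t => c :: t)

-- relative first-occurrence dedup: the new elements a stream adds to a seen-set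
def pvNew {α : Type} [DecidableEq α] : List α → List α → List α
  | _, [] => []
  | seen, x :: xs => if x ∈ seen then pvNew seen xs else x :: pvNew (seen ++ [x]) xs

lemma pvDict_eq_mk : (PySem.Dict.ofList [('i', 'l'), ('l', 'i')]) = PySem.Dict.mk [('i', 'l'), ('l', 'i')] := by decide

lemma pvDict_get? (c : Char) :
    (PySem.Dict.ofList [('i', 'l'), ('l', 'i')]).get? c =
      if pvIsSwap c = true then some (pvSwapC c) else none := by
  rw [pvDict_eq_mk, PySem.Dict.get?_mk_cons, PySem.Dict.get?_mk_cons]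
  by_cases hi : c = 'i'
  · subst hi; decide
  · by_cases hl : c = 'l'
    · subst hl; decide
    · rw [if_neg (by simp [Ne.symm hi]), if_neg (by simp [Ne.symm hl])]
      simp [PySem.Dict.get?, pvIsSwap, hi, hl]

lemma pvDict_getD (c : Char) :
    (PySem.Dict.ofList [('i', 'l'), ('l', 'i')]).getD c c = pvSwapC c := by
  rw [PySem.Dict.getD, pvDict_get?]
  by_cases hsw : pvIsSwap c = true
  · simp [hsw]
  · simp only [pvIsSwap, Bool.or_eq_true, decide_eq_true_eq] at hsw
    obtain ⟨hi, hl⟩ := not_or.mp hsw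
    simp [pvIsSwap, hi, hl, pvSwapC]

lemma pvDict_contains (c : Char) :
    (PySem.Dict.ofList [('i', 'l'), ('l', 'i')]).contains c = pvIsSwap c := by
  rw [pvDict_eq_mk, PySem.Dict.contains_mk]
  by_cases hi : c = 'i'
  · subst hi; decide
  · by_cases hl : c = 'l'
    · subst hl; decide
    · simp [List.any_cons, List.any_nil, pvIsSwap, hi, hl,
        Ne.symm hi, Ne.symm hl]

lemma pv_take_append_take {α : Type} (n : Nat) (xs ys : List α) :
    (xs.take n ++ ys.take n).take n = (xs ++ ys).take n := by
  simp only [List.take_append, List.take_take, List.length_take]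
  have h2 : min (n - min n xs.length) n = n - xs.length := by omega
  rw [min_self, h2]

lemma pv_mem_pvNew {α : Type} [DecidableEq α] (x : α) :
    ∀ (xs seen : List α), x ∈ pvNew seen xs ↔ x ∈ xs ∧ x ∉ seen := by
  intro xs
  induction xs with
  | nil => intro seen; simp [pvNew]
  | cons y ys ih =>
    intro seen
    by_cases hy : y ∈ seen
    · rw [pvNew, if_pos hy, ih]
      constructor
      · rintro ⟨hx, hns⟩; exact ⟨List.mem_cons_of_mem _ hx, hns⟩
      · rintro ⟨hx, hns⟩
        rcases List.mem_cons.mp hx with rfl | hx'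
        · exact absurd hy hns
        · exact ⟨hx', hns⟩
    · rw [pvNew, if_neg hy, List.mem_cons, ih]
      constructor
      · rintro (rfl | ⟨hx, hns⟩)
        · exact ⟨by simp, hy⟩
        · exact ⟨List.mem_cons_of_mem _ hx, fun h => hns (List.mem_append_left _ h)⟩
      · rintro ⟨hx, hns⟩
        by_cases hxy : x = y
        · exact Or.inl hxy
        · rcases List.mem_cons.mp hx with rfl | hx'
          · exact Or.inl rfl
          · refine Or.inr ⟨hx', fun hmem => ?_⟩
            rcases List.mem_append.mp hmem with h | h
            · exact hns h
            · exact hxy (List.mem_singleton.mp h)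

lemma pvNew_ext {α : Type} [DecidableEq α] :
    ∀ (xs s₁ s₂ : List α), (∀ x ∈ xs, (x ∈ s₁ ↔ x ∈ s₂)) → pvNew s₁ xs = pvNew s₂ xs := by
  intro xs
  induction xs with
  | nil => intro s₁ s₂ _; rfl
  | cons y ys ih =>
    intro s₁ s₂ h
    have hy := h y (by simp)
    by_cases h1 : y ∈ s₁
    · rw [pvNew, pvNew, if_pos h1, if_pos (hy.mp h1)]
      exact ih s₁ s₂ (fun x hx => h x (by simp [hx]))
    · rw [pvNew, pvNew, if_neg h1, if_neg (fun h2 => h1 (hy.mpr h2))]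
      congr 1
      exact ih (s₁ ++ [y]) (s₂ ++ [y]) (fun x hx => by
        simp only [List.mem_append, List.mem_singleton]
        rw [h x (by simp [hx])])

lemma pvNew_nil_of_sub {α : Type} [DecidableEq α] :
    ∀ (xs seen : List α), (∀ x ∈ xs, x ∈ seen) → pvNew seen xs = [] := by
  intro xs
  induction xs with
  | nil => intro seen _; rfl
  | cons y ys ih =>
    intro seen h
    rw [pvNew, if_pos (h y (by simp))]
    exact ih seen (fun x hx => h x (by simp [hx]))

lemma pvNew_append {α : Type} [DecidableEq α] :
    ∀ (xs ys seen : List α),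
      pvNew seen (xs ++ ys) = pvNew seen xs ++ pvNew (seen ++ pvNew seen xs) ys := by
  intro xs
  induction xs with
  | nil => intro ys seen; simp [pvNew]
  | cons x xs ih =>
    intro ys seen
    by_cases hx : x ∈ seen
    · simp only [List.cons_append, pvNew, if_pos hx]
      exact ih ys seen
    · simp only [List.cons_append, pvNew, if_neg hx]
      rw [ih ys (seen ++ [x])]
      simp [List.append_assoc]

lemma pvNew_map {α β : Type} [DecidableEq α] [DecidableEq β] (f : α → β)
    (hf : Function.Injective f) :
    ∀ (xs seen : List α), pvNew (seen.map f) (xs.map f) = (pvNew seen xs).map f := by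
  intro xs
  induction xs with
  | nil => intro seen; rfl
  | cons x xs ih =>
    intro seen
    by_cases hx : x ∈ seen
    · rw [List.map_cons, pvNew, if_pos ((List.mem_map_of_injective hf).mpr hx),
        pvNew, if_pos hx, ih]
    · rw [List.map_cons, pvNew, if_neg (fun h => hx ((List.mem_map_of_injective hf).mp h)),
        pvNew, if_neg hx, List.map_cons]
      congr 1
      have h2 : (seen ++ [x]).map f = seen.map f ++ [f x] := by simp
      rw [← h2, ih]

lemma pvNew_map_nil {α β : Type} [DecidableEq α] [DecidableEq β] (f : α → β)
    (hf : Function.Injective f) (xs : List α) :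
    pvNew [] (xs.map f) = (pvNew [] xs).map f := by
  simpa using pvNew_map f hf xs []

lemma pv_cons_injective (c : Char) : Function.Injective (fun t : List Char => c :: t) := by
  intro a b h
  simpa using h

-- core: first-occurrence dedup of the full cartesian product IS the spine
lemma pvCore : ∀ (cs : List Char),
    pvNew [] (pvProdA (cs.map (fun c => (c, pvSwapC c)))) = pvSpine cs := by
  intro cs
  induction cs with
  | nil => rfl
  | cons c cs ih =>
    simp only [List.map_cons, pvProdA, pvSpine]
    rw [pvNew_append]
    simp only [List.nil_append]
    rw [pvNew_map_nil _ (pv_cons_injective c), ih]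
    by_cases hsw : pvIsSwap c = true
    · rw [if_pos hsw]
      have hne : pvSwapC c ≠ c := by
        simp only [pvIsSwap, Bool.or_eq_true, decide_eq_true_eq] at hsw
        rcases hsw with h | h <;> subst h <;> decide
      have hdisj : pvNew ((pvSpine cs).map (fun t => c :: t))
          ((pvProdA (cs.map (fun c => (c, pvSwapC c)))).map (fun t => pvSwapC c :: t))
          = pvNew [] ((pvProdA (cs.map (fun c => (c, pvSwapC c)))).map (fun t => pvSwapC c :: t)) := by
        apply pvNew_ext
        intro y hy
        simp only [List.mem_map] at hy
        obtain ⟨t, -, rfl⟩ := hy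
        simp only [List.not_mem_nil, iff_false, List.mem_map, not_exists, not_and]
        intro t' _ heq
        injection heq with h1 _
        exact hne h1.symm
      rw [hdisj, pvNew_map_nil _ (pv_cons_injective (pvSwapC c)), ih]
    · rw [if_neg hsw]
      have hc : pvSwapC c = c := by
        simp only [pvIsSwap, Bool.or_eq_true, decide_eq_true_eq] at hsw
        obtain ⟨hi, hl⟩ := not_or.mp hsw
        simp [pvSwapC, hi, hl]
      rw [hc]
      have hnil : pvNew ((pvSpine cs).map (fun t => c :: t))
          ((pvProdA (cs.map (fun c => (c, pvSwapC c)))).map (fun t => c :: t)) = [] := by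
        apply pvNew_nil_of_sub
        intro y hy
        simp only [List.mem_map] at hy ⊢
        obtain ⟨t, ht, rfl⟩ := hy
        exact ⟨t, ih ▸ (pv_mem_pvNew t _ []).mpr ⟨ht, by simp⟩, rfl⟩
      rw [hnil, List.append_nil]

lemma pvSpine_nodup : ∀ (cs : List Char), (pvSpine cs).Nodup := by
  intro cs
  induction cs with
  | nil => simp [pvSpine]
  | cons c cs ih =>
    rw [pvSpine]
    by_cases hsw : pvIsSwap c = true
    · rw [if_pos hsw]
      have hne : pvSwapC c ≠ c := by
        simp only [pvIsSwap, Bool.or_eq_true, decide_eq_true_eq] at hsw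
        rcases hsw with h | h <;> subst h <;> decide
      refine List.Nodup.append (ih.map (pv_cons_injective c))
        (ih.map (pv_cons_injective (pvSwapC c))) ?_
      intro y hy hy'
      simp only [List.mem_map] at hy hy'
      obtain ⟨t, -, rfl⟩ := hy
      obtain ⟨t', -, heq⟩ := hy'
      injection heq with h1 _
      exact hne h1
    · rw [if_neg hsw]
      exact ih.map (pv_cons_injective c)

lemma pvProdA_head (cs : List Char) :
    ∃ t, pvProdA (cs.map (fun c => (c, pvSwapC c))) = cs :: t := by
  induction cs with
  | nil => exact ⟨[], rfl⟩
  | cons c cs ih =>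
    obtain ⟨t, ht⟩ := ih
    refine ⟨t.map (fun s => c :: s) ++ (pvProdA (cs.map (fun c => (c, pvSwapC c)))).map (fun s => pvSwapC c :: s), ?_⟩
    simp only [List.map_cons, pvProdA, ht]
    simp

lemma pvSpine_head (cs : List Char) : ∃ t, pvSpine cs = cs :: t := by
  induction cs with
  | nil => exact ⟨[], rfl⟩
  | cons c cs ih =>
    obtain ⟨t, ht⟩ := ih
    rw [pvSpine]
    by_cases hsw : pvIsSwap c = true
    · exact ⟨t.map (fun s => c :: s) ++ (pvSpine cs).map (fun s => pvSwapC c :: s),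
        by rw [if_pos hsw, ht]; simp⟩
    · exact ⟨t.map (fun s => c :: s), by rw [if_neg hsw, ht]; simp⟩

lemma pvOfList_injective : Function.Injective String.ofList := by
  intro a b h
  have h2 := congrArg String.toList h
  simpa using h2

-- A's loop with its early break appends the first (maximo - |s|) new distinct strings
lemma pvLoopA_char (maximo : Int) :
    ∀ (xs : List (List Char)) (s : List String), (s.length : Int) < maximo →
      pvLoopA maximo xs s = s ++ (pvNew s (xs.map String.ofList)).take (maximo - s.length).toNat := by
  intro xs
  induction xs with
  | nil => intro s _; simp [pvLoopA, pvNew]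
  | cons comb xs ih =>
    intro s hs
    rw [List.map_cons]
    simp only [pvLoopA]
    by_cases hx : String.ofList comb ∈ s
    · rw [PySem.Set.add_of_mem hx]
      have hlen : ¬ (maximo ≤ PySem.Set.len s) := by
        simp only [PySem.Set.len]
        omega
      rw [if_neg hlen, pvNew, if_pos hx]
      exact ih s hs
    · rw [PySem.Set.add_of_not_mem hx, pvNew, if_neg hx]
      have hlen' : PySem.Set.len (s ++ [String.ofList comb]) = (s.length : Int) + 1 := by
        simp [PySem.Set.len]
      by_cases hm : maximo ≤ (s.length : Int) + 1
      · rw [if_pos (by rw [hlen']; exact hm)]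
        have h1 : (maximo - (s.length : Int)).toNat = 1 := by omega
        rw [h1, List.take_succ_cons, List.take_zero]
      · rw [if_neg (by rw [hlen']; exact hm)]
        have hlen2 : (((s ++ [String.ofList comb]).length : Nat) : Int) < maximo := by
          simp only [List.length_append, List.length_cons, List.length_nil]
          push_cast
          omega
        rw [ih _ hlen2]
        have h2 : (maximo - (s.length : Int)).toNat
            = (maximo - (((s ++ [String.ofList comb]).length : Nat) : Int)).toNat + 1 := by
          simp only [List.length_append, List.length_cons, List.length_nil]
          push_cast
          omega
        rw [h2, List.take_succ_cons]
        simp [List.append_assoc]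

-- B's fold builds the spine truncated to the cap, provided the cap is positive
lemma pvFoldB (n : Nat) (hn : 1 ≤ n) :
    ∀ (cs : List Char),
      List.foldr (fun c vs =>
          if pvIsSwap c = true then
            (vs.map (fun v => c :: v) ++ vs.map (fun v => pvSwapC c :: v)).take n
          else vs.map (fun v => c :: v)) [[]] cs
        = (pvSpine cs).take n := by
  intro cs
  induction cs with
  | nil =>
    simp only [List.foldr_nil, pvSpine]
    cases n with
    | zero => omega
    | succ m => simp
  | cons c cs ih =>
    rw [List.foldr_cons, ih, pvSpine]
    by_cases hsw : pvIsSwap c = true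
    · rw [if_pos hsw, if_pos hsw, List.map_take, List.map_take, pv_take_append_take]
    · rw [if_neg hsw, if_neg hsw, List.map_take]

-- ===== VERDICT (by name: the statement is the Claim_ definition above) =====
theorem variarPossibilidades_spec : Claim_equal_variarPossibilidades := by
  intro link maximo _
  unfold Spec_variarPossibilidades variarPossibilidades variarPossibilidades_alt
  simp only [List.foldl_reverse, pvDict_getD, pvDict_contains]
  by_cases hm : maximo < 1
  · -- cap ≤ 0: A breaks right after the very first insertion; B's limit is 1
    rw [if_pos hm]
    simp only [Int.toNat_one]
    rw [pvFoldB 1 (by omega)]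
    obtain ⟨t, ht⟩ := pvProdA_head link.toList
    rw [ht]
    have hadd : (PySem.Set.empty : PySem.Set String).add (String.ofList link.toList)
        = [String.ofList link.toList] := by
      rw [PySem.Set.add_of_not_mem (by simp [PySem.Set.empty])]
      simp [PySem.Set.empty]
    simp only [pvLoopA, hadd]
    rw [if_pos (by simp [PySem.Set.len]; omega)]
    obtain ⟨t', ht'⟩ := pvSpine_head link.toList
    rw [ht', List.take_succ_cons, List.take_zero, List.map_cons, List.map_nil,
      PySem.Set.ofList_eq_self_of_nodup _ (List.nodup_singleton _)]
  · -- cap ≥ 1: both sides are the first maximo elements of the spine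
    rw [if_neg hm]
    rw [pvFoldB maximo.toNat (by omega)]
    have hempty : (PySem.Set.empty : PySem.Set String) = ([] : List String) := rfl
    rw [pvLoopA_char maximo _ PySem.Set.empty
      (by rw [hempty]; simp; omega)]
    rw [hempty]
    rw [pvNew_map_nil _ pvOfList_injective, pvCore]
    simp only [List.nil_append, List.length_nil, Nat.cast_zero, sub_zero]
    rw [List.map_take]
    have hnd : (List.take maximo.toNat (List.map String.ofList (pvSpine link.toList))).Nodup :=
      (List.take_sublist _ _).nodup ((pvSpine_nodup link.toList).map pvOfList_injective)
    exact (PySem.Set.ofList_eq_self_of_nodup _ hnd).symm
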